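-- pv_equiv track=rewrite | github.com/JasSmiths/Intelligent-Access-Control-System | backend/app/modules/dvla/vehicle_enquiry.py | friendly_vehicle_text
-- ===== SOURCE A (Python) =====
-- ACRONYMS = {
--     "BMW",
--     "BYD",
--     "DAF",
--     "DS",
--     "DVLA",
--     "GMC",
--     "JCB",
--     "KGM",
--     "KTM",
--     "LDV",
--     "MAN",
--     "MG",
--     "MOT",
--     "TVR",
--     "SORN",
--     "VW",
-- }
--
-- SMALL_WORDS = {"and", "at", "by", "for", "from", "in", "of", "on", "or", "the", "to", "with"}
--
-- def friendly_vehicle_text(value: str) -> str: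
--     cleaned = " ".join(value.strip().split())
--     if not cleaned:
--         return ""
--     upper = cleaned.upper()
--     if upper in ACRONYMS:
--         return upper
--     return " ".join(
--         _friendly_hyphenated_word(part, is_first=index == 0)
--         for index, part in enumerate(cleaned.split(" "))
--     )
--
-- def _friendly_hyphenated_word(value: str, *, is_first: bool) -> str:
--     return "-".join(
--         _friendly_word(part, is_first=is_first and index == 0)
--         for index, part in enumerate(value.split("-"))
--     )
--
-- def _friendly_word(value: str, *, is_first: bool) -> str:
--     if not value:
--         return value
--     upper = value.upper()
--     if upper in ACRONYMS:
--         return upper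
--     lower = value.lower()
--     if not is_first and lower in SMALL_WORDS:
--         return lower
--     if value.isdigit():
--         return value
--     return upper[:1] + upper[1:].lower()
-- ===== SOURCE B (Python) =====
-- ACRONYMS = {
--     "BMW", "BYD", "DAF", "DS", "DVLA", "GMC", "JCB", "KGM",
--     "KTM", "LDV", "MAN", "MG", "MOT", "TVR", "SORN", "VW",
-- }
--
-- SMALL_WORDS = {"and", "at", "by", "for", "from", "in", "of", "on", "or", "the", "to", "with"}
--
--
-- def _word(value, first):
--     upper = value.upper()
--     if upper in ACRONYMS:
--         return upper
--     lower = value.lower()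
--     if not first and lower in SMALL_WORDS:
--         return lower
--     return upper[:1] + upper[1:].lower()
--
--
-- def friendly_vehicle_text(value: str) -> str:
--     # One left-to-right scan over the cleaned string: flush the word accumulator
--     # at each separator, copy the separator through, and flip `first` once.
--     # No special cases for "" or a whole-string acronym: the scan's single-word
--     # path already handles both (acronyms contain no separators), and `_word`
--     # needs no empty or digit branch (slicing/case-mapping leave them unchanged).
--     out = word = ""
--     first = True
--     for ch in " ".join(value.strip().split()):
--         if ch in " -":
--             out += _word(word, first) + ch
--             word = ""
--             first = False
--         else:
--             word += ch
--     return out + _word(word, first)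
-- ===== Notes on version B (the rewrite author's own statement) =====
-- stated objective: simpler
-- what changed: Replaces A's nested split/enumerate/join comprehensions and its pre-checks by one left-to-right scan over the cleaned string with a word accumulator and a single first-word flag, dropping A's redundant empty-string, whole-string-acronym, empty-word and digit branches (the scan and the slice-based capitalisation already give the same results there).
import Mathlib
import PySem

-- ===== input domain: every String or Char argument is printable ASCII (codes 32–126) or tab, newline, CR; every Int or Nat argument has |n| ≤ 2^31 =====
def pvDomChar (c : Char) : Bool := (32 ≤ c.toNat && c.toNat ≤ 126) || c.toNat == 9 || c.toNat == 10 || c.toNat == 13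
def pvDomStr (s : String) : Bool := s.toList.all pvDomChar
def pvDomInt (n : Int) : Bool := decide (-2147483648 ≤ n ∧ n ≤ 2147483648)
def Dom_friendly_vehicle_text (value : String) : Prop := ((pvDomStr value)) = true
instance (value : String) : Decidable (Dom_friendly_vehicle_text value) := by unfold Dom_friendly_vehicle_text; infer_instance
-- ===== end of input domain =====

-- B replaces A's nested split/enumerate/join comprehensions with their pre-checks by one
-- left-to-right scan over the cleaned string (word accumulator, one first-word flag), and
-- drops A's redundant empty-string, whole-string-acronym, empty-word and digit branches,
-- which the scan and the slicing already cover — simpler decomposition, same cost.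

-- module constants (shared data of both Pythons)
def pvAcronyms : List (List Char) :=
  ["BMW".toList, "BYD".toList, "DAF".toList, "DS".toList, "DVLA".toList, "GMC".toList,
   "JCB".toList, "KGM".toList, "KTM".toList, "LDV".toList, "MAN".toList, "MG".toList,
   "MOT".toList, "TVR".toList, "SORN".toList, "VW".toList]

def pvSmallWords : List (List Char) :=
  ["and".toList, "at".toList, "by".toList, "for".toList, "from".toList, "in".toList,
   "of".toList, "on".toList, "or".toList, "the".toList, "to".toList, "with".toList]

-- ===== PORT A =====
-- _friendly_word
def fwA (v : List Char) (is_first : Bool) : List Char :=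
  if v.isEmpty then v
  else
    let u := PySem.Chars.upper v
    if pvAcronyms.contains u then u
    else
      let lw := PySem.Chars.lower v
      if !is_first && pvSmallWords.contains lw then lw
      else if PySem.Chars.strIsdigit v then v
      else PySem.Chars.slice u none (some 1) ++ PySem.Chars.lower (PySem.Chars.slice u (some 1) none)

-- _friendly_hyphenated_word
def fhwA (v : List Char) (is_first : Bool) : List Char :=
  PySem.Chars.join ['-']
    ((PySem.List.enumerate (PySem.Chars.splitOn v ['-'])).map
      (fun p => fwA p.2 (is_first && p.1 == 0)))

def fvtA (s : List Char) : List Char :=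
  let cleaned := PySem.Chars.join [' '] (PySem.Chars.split₀ (PySem.Chars.strip s))
  if cleaned.isEmpty then []
  else
    let u := PySem.Chars.upper cleaned
    if pvAcronyms.contains u then u
    else
      PySem.Chars.join [' ']
        ((PySem.List.enumerate (PySem.Chars.splitOn cleaned [' '])).map
          (fun p => fhwA p.2 (p.1 == 0)))

def friendly_vehicle_text (value : String) : String := String.ofList (fvtA value.toList)

-- ===== PORT B =====
-- _word: no empty or digit branch — upper[:1] + upper[1:].lower() already fixes both
def fwB (v : List Char) (first : Bool) : List Char :=
  let u := PySem.Chars.upper v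
  if pvAcronyms.contains u then u
  else
    let w := PySem.Chars.lower v
    if !first && pvSmallWords.contains w then w
    else PySem.Chars.slice u none (some 1) ++ PySem.Chars.lower (PySem.Chars.slice u (some 1) none)

-- the for-loop: out built left to right, word accumulator flushed at ' ' and '-'
def scanB (word : List Char) (first : Bool) : List Char → List Char
  | [] => fwB word first
  | c :: rest =>
      if c = ' ' || c = '-' then fwB word first ++ c :: scanB [] false rest
      else scanB (word ++ [c]) first rest

def fvtB (s : List Char) : List Char :=
  scanB [] true (PySem.Chars.join [' '] (PySem.Chars.split₀ (PySem.Chars.strip s)))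

def friendly_vehicle_text_alt (value : String) : String := String.ofList (fvtB value.toList)

-- ===== PRECONDITION & SPEC =====
def Spec_friendly_vehicle_text (value : String) (out : String) : Prop := out = friendly_vehicle_text_alt value
instance (value : String) (out : String) : Decidable (Spec_friendly_vehicle_text value out) := by unfold Spec_friendly_vehicle_text; infer_instance

-- ===== CLAIM (what is proved, stated in full; the proofs are below) =====
def Claim_equal_friendly_vehicle_text : Prop := ∀ (value : String), Dom_friendly_vehicle_text value → Spec_friendly_vehicle_text value (friendly_vehicle_text value)

-- ===== LEMMAS AND PROOFS =====

-- case mapping fixes non-letters (in particular digits and the separators)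
theorem upperChar_fix (c : Char) (h : ¬ 'a' ≤ c) : PySem.Chars.upperChar c = c := by
  unfold PySem.Chars.upperChar PySem.Chars.islower
  rw [if_neg]
  simp only [Bool.and_eq_true, decide_eq_true_eq, not_and]
  intro h1; exact absurd h1 h

theorem lowerChar_fix (c : Char) (h : ¬ 'A' ≤ c) : PySem.Chars.lowerChar c = c := by
  unfold PySem.Chars.lowerChar PySem.Chars.isupper
  rw [if_neg]
  simp only [Bool.and_eq_true, decide_eq_true_eq, not_and]
  intro h1; exact absurd h1 h

theorem upper_digits (v : List Char) (h : ∀ c ∈ v, c ≤ '9') : PySem.Chars.upper v = v := by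
  unfold PySem.Chars.upper
  induction v with
  | nil => rfl
  | cons a t ih =>
    simp only [List.map_cons, List.cons.injEq]
    exact ⟨upperChar_fix a (fun hle => absurd (le_trans hle (h a (by simp))) (by decide)),
      ih (fun c hc => h c (by simp [hc]))⟩

theorem lower_digits (v : List Char) (h : ∀ c ∈ v, c ≤ '9') : PySem.Chars.lower v = v := by
  unfold PySem.Chars.lower
  induction v with
  | nil => rfl
  | cons a t ih =>
    simp only [List.map_cons, List.cons.injEq]
    exact ⟨lowerChar_fix a (fun hle => absurd (le_trans hle (h a (by simp))) (by decide)),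
      ih (fun c hc => h c (by simp [hc]))⟩

-- B's word rule equals A's on every word: the empty and digit branches are redundant
theorem fwB_eq_fwA (v : List Char) (f : Bool) : fwB v f = fwA v f := by
  cases v with
  | nil => cases f <;> decide
  | cons a t =>
    unfold fwA fwB
    simp only [List.isEmpty_cons, Bool.false_eq_true, if_false]
    by_cases hA : pvAcronyms.contains (PySem.Chars.upper (a :: t))
    · simp only [hA, if_true]
    · simp only [hA, Bool.false_eq_true, if_false]
      by_cases hS : (!f && pvSmallWords.contains (PySem.Chars.lower (a :: t))) = true
      · simp only [hS, if_true]
      · simp only [hS, Bool.false_eq_true, if_false]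
        by_cases hD : PySem.Chars.strIsdigit (a :: t) = true
        · simp only [hD, if_true]
          have hall : ∀ c ∈ (a :: t), c ≤ '9' := by
            unfold PySem.Chars.strIsdigit PySem.Chars.isdigit at hD
            simp only [Bool.and_eq_true, List.all_eq_true, decide_eq_true_eq] at hD
            intro c hc; exact (hD.2 c hc).2
          rw [upper_digits _ hall, PySem.Chars.slice_eq_listSlice,
            PySem.Chars.slice_eq_listSlice,
            PySem.List.slice_to (a :: t) (by omega : (0:Int) ≤ 1),
            PySem.List.slice_from (a :: t) (by omega : (0:Int) ≤ 1)]
          rw [lower_digits _ (fun c hc => hall c (List.mem_of_mem_drop hc))]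
          simp
        · simp only [hD, Bool.false_eq_true, if_false]

-- normal form of A's nested comprehensions: split on a char, process first piece with the
-- flag, the rest with flag false, join back
def consHead (w : List Char) : List (List Char) → List (List Char)
  | [] => [w]
  | p :: ps => (w ++ p) :: ps

def mySplit (c : Char) : List Char → List (List Char)
  | [] => [[]]
  | x :: xs => if x = c then [] :: mySplit c xs else consHead [x] (mySplit c xs)

def mapFirst {α : Type} (g : α → Bool → List Char) (f : Bool) : List α → List (List Char)
  | [] => []
  | h :: t => g h f :: t.map (fun v => g v false)

def pfh (v : List Char) (f : Bool) : List Char :=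
  PySem.Chars.join ['-'] (mapFirst fwA f (mySplit '-' v))

def pA (f : Bool) (l : List Char) : List Char :=
  PySem.Chars.join [' '] (mapFirst pfh f (mySplit ' ' l))

theorem mySplit_ne_nil (c : Char) (l : List Char) : mySplit c l ≠ [] := by
  cases l with
  | nil => simp [mySplit]
  | cons x xs =>
    simp only [mySplit]
    split
    · simp
    · cases h : mySplit c xs <;> simp [consHead]

theorem consHead_nil_of_ne (r : List (List Char)) (h : r ≠ []) : consHead [] r = r := by
  cases r with
  | nil => exact absurd rfl h
  | cons p ps => simp [consHead]

theorem consHead_consHead (u v : List Char) (r : List (List Char)) :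
    consHead u (consHead v r) = consHead (u ++ v) r := by
  cases r <;> simp [consHead]

-- the fuel-based PySem splitter agrees with mySplit for a one-char separator
theorem splitOn_go_eq (c : Char) (fuel : Nat) :
    ∀ (l cur : List Char) (acc : List (List Char)), l.length ≤ fuel →
      PySem.Chars.splitOn.go [c] fuel l cur acc =
        acc.reverse ++ consHead cur.reverse (mySplit c l) := by
  induction fuel with
  | zero =>
    intro l cur acc h
    have : l = [] := by cases l <;> simp_all
    subst this
    simp [PySem.Chars.splitOn.go, mySplit, consHead]
  | succ n ih =>
    intro l cur acc h
    cases l with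
    | nil => simp [PySem.Chars.splitOn.go, mySplit, consHead]
    | cons x rest =>
      have hr : rest.length ≤ n := by simpa using h
      by_cases hx : x = c
      · subst hx
        have hpre : List.isPrefixOf [x] (x :: rest) = true := by
          simp [List.isPrefixOf]
        rw [PySem.Chars.splitOn.go, if_pos hpre]
        have hd : List.drop (List.length [x]) (x :: rest) = rest := by simp
        rw [hd, ih rest [] (cur.reverse :: acc) hr]
        have : mySplit x (x :: rest) = [] :: mySplit x rest := by simp [mySplit]
        rw [this]
        simp only [List.reverse_nil]
        rw [consHead_nil_of_ne _ (mySplit_ne_nil x rest)]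
        simp [consHead]
      · have hpre : List.isPrefixOf [c] (x :: rest) = false := by
          simp [List.isPrefixOf]
          intro h'; exact absurd h'.symm hx
        rw [PySem.Chars.splitOn.go, if_neg (by simp [hpre])]
        rw [ih rest (x :: cur) acc hr]
        have : mySplit c (x :: rest) = consHead [x] (mySplit c rest) := by
          simp [mySplit, hx]
        rw [this, consHead_consHead]
        simp

theorem splitOn_eq (c : Char) (l : List Char) :
    PySem.Chars.splitOn l [c] = mySplit c l := by
  rw [PySem.Chars.splitOn, splitOn_go_eq c (l.length + 1) l [] [] (by omega)]
  simp [consHead_nil_of_ne _ (mySplit_ne_nil c l)]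

theorem mySplit_append (c : Char) (w l : List Char) (h : c ∉ w) :
    mySplit c (w ++ l) = consHead w (mySplit c l) := by
  induction w with
  | nil => simp [consHead_nil_of_ne _ (mySplit_ne_nil c l)]
  | cons a w' ih =>
    have ha : a ≠ c := by intro hh; exact h (by simp [hh])
    have h' : c ∉ w' := fun hh => h (by simp [hh])
    simp only [List.cons_append, mySplit, if_neg ha, ih h', consHead_consHead]
    simp

theorem mySplit_no_sep (c : Char) (w : List Char) (h : c ∉ w) : mySplit c w = [w] := by
  have := mySplit_append c w [] h
  simpa [mySplit, consHead] using this

-- join over a one-char separator, cons form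
theorem join_cons (c : Char) (x : List Char) (r : List (List Char)) :
    PySem.Chars.join [c] (x :: r) =
      x ++ (if r.isEmpty then [] else c :: PySem.Chars.join [c] r) := by
  cases r with
  | nil => simp [PySem.Chars.join, List.intercalate]
  | cons y ys => simp [PySem.Chars.join, List.intercalate, List.intersperse]

-- enumerate with flag (i == 0): only the head piece sees the flag
theorem enum_map_shift {α : Type} (g : α → Bool → List Char) (f : Bool) :
    ∀ (t : List α) (s : Int), 1 ≤ s →
      (PySem.List.enumerate t s).map (fun p => g p.2 (f && p.1 == 0)) =
        t.map (fun v => g v false) := by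
  intro t
  induction t with
  | nil => intro s _; simp [PySem.List.enumerate]
  | cons y ys ih =>
    intro s hs
    have h0 : (s == (0 : Int)) = false := by simp; omega
    simp only [PySem.List.enumerate, List.map_cons, h0, Bool.and_false]
    rw [ih (s + 1) (by omega)]

theorem enum_map_first {α : Type} (g : α → Bool → List Char) (f : Bool) (h : α) (t : List α) :
    (PySem.List.enumerate (h :: t)).map (fun p => g p.2 (f && p.1 == 0)) =
      mapFirst g f (h :: t) := by
  simp only [PySem.List.enumerate, List.map_cons, mapFirst]
  rw [show (0:Int) + 1 = 1 from rfl, enum_map_shift g f t 1 (by omega)]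
  norm_num

-- A's branch equals the normal form pA
theorem fhwA_eq_pfh (v : List Char) (f : Bool) : fhwA v f = pfh v f := by
  unfold fhwA pfh
  rw [splitOn_eq]
  obtain ⟨h, t, ht⟩ : ∃ h t, mySplit '-' v = h :: t := by
    cases hm : mySplit '-' v with
    | nil => exact absurd hm (mySplit_ne_nil _ _)
    | cons h t => exact ⟨h, t, rfl⟩
  rw [ht, enum_map_first]

theorem fvtA_branch_eq_pA (l : List Char) :
    PySem.Chars.join [' ']
        ((PySem.List.enumerate (PySem.Chars.splitOn l [' '])).map
          (fun p => fhwA p.2 (p.1 == 0))) = pA true l := by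
  unfold pA
  rw [splitOn_eq]
  obtain ⟨h, t, ht⟩ : ∃ h t, mySplit ' ' l = h :: t := by
    cases hm : mySplit ' ' l with
    | nil => exact absurd hm (mySplit_ne_nil _ _)
    | cons h t => exact ⟨h, t, rfl⟩
  rw [ht]
  have := enum_map_first (fun v b => fhwA v b) true h t
  simp only [Bool.true_and] at this
  rw [this]
  simp only [mapFirst]
  simp [fhwA_eq_pfh]

theorem mapFirst_false {α : Type} (g : α → Bool → List Char) (r : List α) :
    mapFirst g false r = r.map (fun v => g v false) := by
  cases r <;> simp [mapFirst]

theorem pfh_no_hyphen (w : List Char) (f : Bool) (h : '-' ∉ w) : pfh w f = fwA w f := by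
  simp [pfh, mySplit_no_sep _ _ h, mapFirst]

theorem pA_no_sep (w : List Char) (f : Bool) (hs : ' ' ∉ w) (hh : '-' ∉ w) :
    pA f w = fwA w f := by
  simp [pA, mySplit_no_sep _ _ hs, mapFirst, pfh_no_hyphen _ _ hh]

theorem pfh_eq_join_map (v : List Char) :
    pfh v false = PySem.Chars.join ['-'] ((mySplit '-' v).map (fun p => fwA p false)) := by
  rw [pfh, mapFirst_false]

theorem pA_eq_join_map (l : List Char) :
    pA false l = PySem.Chars.join [' '] ((mySplit ' ' l).map (fun p => pfh p false)) := by
  rw [pA, mapFirst_false]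

theorem pA_sep_space (w rest : List Char) (f : Bool) (hs : ' ' ∉ w) (hh : '-' ∉ w) :
    pA f (w ++ ' ' :: rest) = fwA w f ++ ' ' :: pA false rest := by
  obtain ⟨p0, ps, hps⟩ : ∃ p0 ps, mySplit ' ' rest = p0 :: ps := by
    cases hm : mySplit ' ' rest with
    | nil => exact absurd hm (mySplit_ne_nil _ _)
    | cons p0 ps => exact ⟨p0, ps, rfl⟩
  have h1 : mySplit ' ' (w ++ ' ' :: rest) = w :: p0 :: ps := by
    rw [mySplit_append _ _ _ hs]
    simp [mySplit, hps, consHead]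
  rw [pA, h1]
  simp only [mapFirst]
  rw [join_cons]
  simp only [List.map_cons, List.isEmpty_cons, Bool.false_eq_true, if_false]
  rw [pfh_no_hyphen _ _ hh, pA_eq_join_map, hps]
  simp

theorem pA_sep_hyphen (w rest : List Char) (f : Bool) (hs : ' ' ∉ w) (hh : '-' ∉ w) :
    pA f (w ++ '-' :: rest) = fwA w f ++ '-' :: pA false rest := by
  obtain ⟨p0, ps, hps⟩ : ∃ p0 ps, mySplit ' ' rest = p0 :: ps := by
    cases hm : mySplit ' ' rest with
    | nil => exact absurd hm (mySplit_ne_nil _ _)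
    | cons p0 ps => exact ⟨p0, ps, rfl⟩
  have h1 : mySplit ' ' (w ++ '-' :: rest) = (w ++ '-' :: p0) :: ps := by
    rw [mySplit_append _ _ _ hs]
    simp only [mySplit, if_neg (by decide : ¬('-' = ' ')), hps, consHead]
    simp
  have h2 : pfh (w ++ '-' :: p0) f = fwA w f ++ '-' :: pfh p0 false := by
    obtain ⟨q0, qs, hqs⟩ : ∃ q0 qs, mySplit '-' p0 = q0 :: qs := by
      cases hm : mySplit '-' p0 with
      | nil => exact absurd hm (mySplit_ne_nil _ _)
      | cons q0 qs => exact ⟨q0, qs, rfl⟩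
    have : mySplit '-' (w ++ '-' :: p0) = w :: q0 :: qs := by
      rw [mySplit_append _ _ _ hh]
      simp [mySplit, hqs, consHead]
    rw [pfh, this]
    simp only [mapFirst]
    rw [join_cons]
    simp only [List.map_cons, List.isEmpty_cons, Bool.false_eq_true, if_false]
    rw [pfh_eq_join_map, hqs]
    simp
  rw [pA, h1]
  simp only [mapFirst]
  rw [join_cons, h2, pA_eq_join_map, hps]
  simp only [List.map_cons]
  rw [join_cons]
  simp

-- main loop invariant: scanning with a separator-free word prefix equals A's normal form
theorem scanB_eq_pA (l : List Char) : ∀ (w : List Char) (f : Bool), ' ' ∉ w → '-' ∉ w →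
    scanB w f l = pA f (w ++ l) := by
  induction l with
  | nil =>
    intro w f hs hh
    simp only [scanB, List.append_nil, pA_no_sep _ _ hs hh, fwB_eq_fwA]
  | cons c rest ih =>
    intro w f hs hh
    by_cases hc : c = ' '
    · subst hc
      rw [scanB, if_pos (by simp), fwB_eq_fwA, ih [] false (by simp) (by simp),
        pA_sep_space _ _ _ hs hh]
      simp
    · by_cases hd : c = '-'
      · subst hd
        rw [scanB, if_pos (by simp), fwB_eq_fwA, ih [] false (by simp) (by simp),
          pA_sep_hyphen _ _ _ hs hh]
        simp
      · rw [scanB, if_neg (by simp [hc, hd]),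
          ih (w ++ [c]) f (by simp [hs]; exact fun h => hc h.symm)
            (by simp [hh]; exact fun h => hd h.symm)]
        simp

-- a separator-free string is scanned as a single word
theorem scanB_no_sep (l : List Char) (hs : ' ' ∉ l) (hh : '-' ∉ l) :
    scanB [] true l = fwB l true := by
  rw [scanB_eq_pA l [] true (by simp) (by simp), List.nil_append,
    pA_no_sep _ _ hs hh, fwB_eq_fwA]

-- no acronym contains a separator, and case mapping keeps separators in place
theorem acronym_no_sep (l : List Char)
    (h : pvAcronyms.contains (PySem.Chars.upper l) = true) : ' ' ∉ l ∧ '-' ∉ l := by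
  have hmem : ∀ a ∈ pvAcronyms, ' ' ∉ a ∧ '-' ∉ a := by decide
  have hup : PySem.Chars.upper l ∈ pvAcronyms := by
    simpa [List.contains_eq_mem] using h
  constructor
  · intro hc
    have : PySem.Chars.upperChar ' ' ∈ PySem.Chars.upper l := List.mem_map_of_mem hc
    rw [show PySem.Chars.upperChar ' ' = ' ' from by decide] at this
    exact (hmem _ hup).1 this
  · intro hc
    have : PySem.Chars.upperChar '-' ∈ PySem.Chars.upper l := List.mem_map_of_mem hc
    rw [show PySem.Chars.upperChar '-' = '-' from by decide] at this
    exact (hmem _ hup).2 this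

theorem fvt_eq (l : List Char) : fvtA l = fvtB l := by
  unfold fvtA fvtB
  set cleaned := PySem.Chars.join [' '] (PySem.Chars.split₀ (PySem.Chars.strip l)) with hcl
  by_cases h1 : cleaned.isEmpty
  · rw [if_pos h1]
    rw [List.isEmpty_iff] at h1
    rw [h1]
    decide
  · rw [if_neg h1]
    by_cases h2 : pvAcronyms.contains (PySem.Chars.upper cleaned)
    · rw [if_pos h2]
      obtain ⟨hs, hh⟩ := acronym_no_sep cleaned h2
      rw [scanB_no_sep cleaned hs hh]
      unfold fwB
      simp only [h2, if_true]
    · rw [if_neg h2]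
      rw [fvtA_branch_eq_pA, ← List.nil_append cleaned,
        ← scanB_eq_pA _ [] true (by simp) (by simp)]
      simp

-- ===== VERDICT (by name: the statement is the Claim_ definition above) =====
theorem friendly_vehicle_text_spec : Claim_equal_friendly_vehicle_text := by
  intro value _
  unfold Spec_friendly_vehicle_text friendly_vehicle_text friendly_vehicle_text_alt
  rw [fvt_eq]
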